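-- pv_equiv track=rewrite | github.com/yaeba/binary-search-solutions | solutions/Contained-Interval.py | solve
-- ===== SOURCE A (Python) =====
-- def solve(intervals):
--     s = sorted(intervals, key=lambda x: (x[0], -x[1]))
--     for i in range(1, len(s)):
--         _, b1 = s[i - 1]
--         _, b2 = s[i]
--         if b2 <= b1:
--             return True
--
--     return False
-- ===== SOURCE B (Python) =====
-- def solve(intervals):
--     for i, (a1, b1) in enumerate(intervals):
--         for j, (a2, b2) in enumerate(intervals):
--             if i != j and a1 <= a2 and b2 <= b1:
--                 return True
--     return False
-- ===== Notes on version B (the rewrite author's own statement) =====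
-- stated objective: alternative
-- what changed: Replaced the sort-by-(start,-end)-then-adjacent-scan with a direct quadratic scan over all ordered index pairs testing containment, with no sorting at all.
import Mathlib
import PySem

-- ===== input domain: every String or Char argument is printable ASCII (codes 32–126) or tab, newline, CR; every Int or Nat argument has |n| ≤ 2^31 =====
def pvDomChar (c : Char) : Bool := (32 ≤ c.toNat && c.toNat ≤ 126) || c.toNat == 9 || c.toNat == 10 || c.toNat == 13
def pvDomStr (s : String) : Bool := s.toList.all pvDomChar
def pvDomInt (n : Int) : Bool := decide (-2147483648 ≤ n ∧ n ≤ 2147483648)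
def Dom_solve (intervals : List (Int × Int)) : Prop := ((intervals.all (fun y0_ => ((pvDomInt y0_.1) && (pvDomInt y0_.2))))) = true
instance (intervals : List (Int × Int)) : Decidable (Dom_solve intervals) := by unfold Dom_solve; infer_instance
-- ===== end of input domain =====

-- B replaces A's sort-by-(start,-end) + adjacent scan by a direct quadratic scan over all
-- ordered index pairs testing containment (alternative algorithm, no sort).

-- ===== PORT A =====
-- Python's tuple key (x[0], -x[1]) compares lexicographically: Int ×ₗ Int is exact here.
def pvKey (x : Int × Int) : Lex (Int × Int) := toLex (x.1, -x.2)

-- the loop 'for i in range(1, len(s)): … if b2 <= b1: return True' over adjacent pairs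
def pvScan : List (Int × Int) → Bool
  | p :: q :: rest => if q.2 ≤ p.2 then true else pvScan (q :: rest)
  | _ => false

def solve (intervals : List (Int × Int)) : Bool :=
  pvScan (PySem.List.sorted intervals pvKey)

-- ===== PORT B =====
def solve_alt (intervals : List (Int × Int)) : Bool :=
  (PySem.List.enumerate intervals 0).any (fun ip =>
    (PySem.List.enumerate intervals 0).any (fun jq =>
      ip.1 != jq.1 && decide (ip.2.1 ≤ jq.2.1) && decide (jq.2.2 ≤ ip.2.2)))

-- ===== PRECONDITION & SPEC =====
def Spec_solve (intervals : List (Int × Int)) (out : Bool) : Prop := out = solve_alt intervals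
instance (intervals : List (Int × Int)) (out : Bool) : Decidable (Spec_solve intervals out) := by unfold Spec_solve; infer_instance

-- ===== CLAIM (what is proved, stated in full; the proofs are below) =====
def Claim_equal_solve : Prop := ∀ (intervals : List (Int × Int)), Dom_solve intervals → Spec_solve intervals (solve intervals)

-- ===== LEMMAS AND PROOFS =====

-- "some pair of distinct positions (k,l) is a containment pair", stated on indices
def pvQi (xs : List (Int × Int)) : Prop :=
  ∃ (k l : Nat) (x y : Int × Int), k ≠ l ∧ xs[k]? = some x ∧ xs[l]? = some y ∧
    x.1 ≤ y.1 ∧ y.2 ≤ x.2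

-- the same, stated on sub-permutations (invariant under permutation)
def pvQp (xs : List (Int × Int)) : Prop :=
  ∃ x y : Int × Int, List.Subperm [x, y] xs ∧ x.1 ≤ y.1 ∧ y.2 ≤ x.2

theorem pv_perm_pair {α : Type} {l : List α} {x y : α} (h : l.Perm [x, y]) :
    l = [x, y] ∨ l = [y, x] := by
  match l, h.length_eq with
  | [a, b], _ =>
    have ha : a = x ∨ a = y := by
      have := (h.mem_iff (a := a)).1 (by simp)
      simpa using this
    rcases ha with rfl | rfl
    · have := List.perm_singleton.1 h.cons_inv
      simp [this]
    · have h' : [a, b].Perm [a, x] := h.trans (List.Perm.swap _ _ _)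
      have := List.perm_singleton.1 h'.cons_inv
      simp [this]

theorem pv_sub_pair_of_idx {xs : List (Int × Int)} {k l : Nat} {x y : Int × Int}
    (hkl : k < l) (hx : xs[k]? = some x) (hy : xs[l]? = some y) : List.Sublist [x, y] xs := by
  rcases List.getElem?_eq_some_iff.1 hx with ⟨hk, hxe⟩
  have heq : k + 1 + (l - (k + 1)) = l := by omega
  have hd : (xs.drop (k + 1))[l - (k + 1)]? = some y := by
    rw [List.getElem?_drop, heq]; exact hy
  have hy' : y ∈ xs.drop (k + 1) := List.mem_of_getElem? hd
  have h1 : List.Sublist [x, y] (x :: xs.drop (k + 1)) :=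
    List.cons_sublist_cons.2 (List.singleton_sublist.2 hy')
  have h2 : x :: xs.drop (k + 1) = xs.drop k := by
    rw [← hxe]; exact List.getElem_cons_drop hk
  exact (h2 ▸ h1).trans (List.drop_sublist k xs)

theorem pv_idx_of_sub_pair {xs : List (Int × Int)} {x y : Int × Int}
    (h : List.Sublist [x, y] xs) : ∃ k l : Nat, k < l ∧ xs[k]? = some x ∧ xs[l]? = some y := by
  induction xs with
  | nil => cases h
  | cons c t ih =>
    cases h with
    | cons _ h' =>
      rcases ih h' with ⟨k, l, hkl, hx, hy⟩
      exact ⟨k + 1, l + 1, by omega, by simpa using hx, by simpa using hy⟩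
    | cons₂ _ h' =>
      rcases List.getElem?_of_mem (List.singleton_sublist.1 h') with ⟨l, hl⟩
      exact ⟨0, l + 1, by omega, by simp, by simpa using hl⟩

theorem pv_Qi_iff_Qp (xs : List (Int × Int)) : pvQi xs ↔ pvQp xs := by
  constructor
  · rintro ⟨k, l, x, y, hkl, hx, hy, h1, h2⟩
    rcases Nat.lt_or_ge k l with h | h
    · exact ⟨x, y, (pv_sub_pair_of_idx h hx hy).subperm, h1, h2⟩
    · have hlk : l < k := by omega
      exact ⟨x, y, ⟨[y, x], List.Perm.swap _ _ _, pv_sub_pair_of_idx hlk hy hx⟩, h1, h2⟩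
  · rintro ⟨x, y, ⟨m, hm, hsub⟩, h1, h2⟩
    rcases pv_perm_pair hm with rfl | rfl
    · rcases pv_idx_of_sub_pair hsub with ⟨k, l, hkl, hx, hy⟩
      exact ⟨k, l, x, y, by omega, hx, hy, h1, h2⟩
    · rcases pv_idx_of_sub_pair hsub with ⟨k, l, hkl, hy, hx⟩
      exact ⟨l, k, x, y, by omega, hx, hy, h1, h2⟩

theorem pv_Qp_perm {xs ys : List (Int × Int)} (h : xs.Perm ys) : pvQp xs ↔ pvQp ys := by
  constructor
  · rintro ⟨x, y, hs, h1, h2⟩; exact ⟨x, y, hs.trans h.subperm, h1, h2⟩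
  · rintro ⟨x, y, hs, h1, h2⟩; exact ⟨x, y, hs.trans h.symm.subperm, h1, h2⟩

theorem pv_alt_iff (xs : List (Int × Int)) : solve_alt xs = true ↔ pvQi xs := by
  unfold solve_alt
  rw [List.any_eq_true]
  constructor
  · rintro ⟨ip, hip, hb⟩
    rw [List.any_eq_true] at hb
    rcases hb with ⟨jq, hjq, hcond⟩
    rcases (PySem.List.mem_enumerate_iff _ _ _).1 hip with ⟨k, hk, rfl⟩
    rcases (PySem.List.mem_enumerate_iff _ _ _).1 hjq with ⟨l, hl, rfl⟩
    simp only [Bool.and_eq_true, bne_iff_ne, decide_eq_true_eq] at hcond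
    refine ⟨k, l, xs[k], xs[l], ?_, by simp, by simp, hcond.1.2, hcond.2⟩
    intro h; exact hcond.1.1 (by simp [h])
  · rintro ⟨k, l, x, y, hkl, hx, hy, h1, h2⟩
    rcases List.getElem?_eq_some_iff.1 hx with ⟨hk, rfl⟩
    rcases List.getElem?_eq_some_iff.1 hy with ⟨hl, rfl⟩
    refine ⟨((0 : Int) + k, xs[k]), (PySem.List.mem_enumerate_iff _ _ _).2 ⟨k, hk, rfl⟩, ?_⟩
    rw [List.any_eq_true]
    refine ⟨((0 : Int) + l, xs[l]), (PySem.List.mem_enumerate_iff _ _ _).2 ⟨l, hl, rfl⟩, ?_⟩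
    simp only [Bool.and_eq_true, bne_iff_ne, decide_eq_true_eq]
    refine ⟨⟨?_, h1⟩, h2⟩
    intro h; apply hkl; omega

theorem pv_scan_true {s : List (Int × Int)}
    (hp : s.Pairwise (fun a b => pvKey a ≤ pvKey b)) (h : pvScan s = true) : pvQi s := by
  induction s with
  | nil => simp [pvScan] at h
  | cons p t ih =>
    cases t with
    | nil => simp [pvScan] at h
    | cons q rest =>
      rw [pvScan] at h
      by_cases hb : q.2 ≤ p.2
      · have hkey : pvKey p ≤ pvKey q := (List.pairwise_cons.1 hp).1 q (by simp)
        have h1 : p.1 ≤ q.1 := by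
          rcases Prod.Lex.le_iff.1 hkey with h' | h'
          · exact le_of_lt h'
          · exact le_of_eq h'.1
        exact ⟨0, 1, p, q, by omega, by simp, by simp, h1, hb⟩
      · rw [if_neg hb] at h
        rcases ih (List.pairwise_cons.1 hp).2 h with ⟨k, l, x, y, hkl, hx, hy, h1, h2⟩
        exact ⟨k + 1, l + 1, x, y, by omega, by simpa using hx, by simpa using hy, h1, h2⟩

theorem pv_scan_false {s : List (Int × Int)}
    (h : pvScan s = false) : s.Pairwise (fun a b => a.2 < b.2) := by
  induction s with
  | nil => simp
  | cons p t ih =>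
    cases t with
    | nil => simp
    | cons q rest =>
      rw [pvScan] at h
      by_cases hb : q.2 ≤ p.2
      · rw [if_pos hb] at h; cases h
      · rw [if_neg hb] at h
        have htail := ih h
        rw [List.pairwise_cons]
        refine ⟨?_, htail⟩
        intro b hbmem
        rcases List.mem_cons.1 hbmem with rfl | hbmem
        · omega
        · have : q.2 < b.2 := (List.pairwise_cons.1 htail).1 b hbmem
          omega

theorem pv_main (xs : List (Int × Int)) : solve xs = solve_alt xs := by
  unfold solve
  have hperm : (PySem.List.sorted xs pvKey).Perm xs := PySem.List.sorted_perm xs pvKey false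
  cases hA : pvScan (PySem.List.sorted xs pvKey) with
  | true =>
    have hq : pvQi (PySem.List.sorted xs pvKey) :=
      pv_scan_true (PySem.List.sorted_pairwise xs pvKey) hA
    have : pvQi xs := (pv_Qi_iff_Qp xs).2 ((pv_Qp_perm hperm).1 ((pv_Qi_iff_Qp _).1 hq))
    exact ((pv_alt_iff xs).2 this).symm
  | false =>
    cases h' : solve_alt xs with
    | false => rfl
    | true =>
    exfalso
    have hq : pvQi (PySem.List.sorted xs pvKey) :=
      (pv_Qi_iff_Qp _).2 ((pv_Qp_perm hperm).2 ((pv_Qi_iff_Qp xs).1 ((pv_alt_iff xs).1 h')))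
    rcases hq with ⟨k, l, x, y, hkl, hx, hy, h1, h2⟩
    rcases List.getElem?_eq_some_iff.1 hx with ⟨hk, hxe⟩
    rcases List.getElem?_eq_some_iff.1 hy with ⟨hl, hye⟩
    have hkeyp := List.pairwise_iff_getElem.1 (PySem.List.sorted_pairwise xs pvKey)
    have hincp := List.pairwise_iff_getElem.1 (pv_scan_false hA)
    rcases Nat.lt_or_ge k l with hlt | hge
    · have := hincp k l hk hl hlt
      rw [hxe, hye] at this; omega
    · have hlk : l < k := by omega
      have hinc := hincp l k hl hk hlk
      have hkey := hkeyp l k hl hk hlk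
      rw [hxe, hye] at hinc hkey
      simp only [pvKey, Prod.Lex.le_iff, ofLex_toLex] at hkey
      rcases hkey with hc | ⟨hc1, hc2⟩ <;> omega

-- ===== VERDICT (by name: the statement is the Claim_ definition above) =====
theorem solve_spec : Claim_equal_solve := by
  intro xs _
  unfold Spec_solve
  exact pv_main xs
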